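-- pv_equiv track=rewrite | github.com/nguyenhachuy/leetcode | stripe-interview.py | first_by_key
-- ===== SOURCE A (Python) =====
-- class RecordComparator:
--     def __init__(self, key, sort_direction):
--         self.key = key
--         self.lt_value = -1 if sort_direction == "asc" else 1
--     def compare(self, record_1, record_2):
--         record_1_value = int(record_1[self.key]) if self.key in record_1 else 0
--         record_2_value = int(record_2[self.key]) if self.key in record_2 else 0
--
--         if record_1_value < record_2_value:
--             return self.lt_value
--         elif record_1_value > record_2_value:
--             return -1*self.lt_value
--         else:
--             return 0
--
-- def first_by_key(records, sort_direction, key):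
--     if not records:
--         return {}
--
--     min_record = records[0]
--     comparator = RecordComparator(key, sort_direction)
--
--     for record in records:
--         if comparator.compare(record, min_record) == -1:
--             min_record = record
--
--     return min_record
-- ===== SOURCE B (Python) =====
-- def first_by_key(records, sort_direction, key):
--     if not records:
--         return {}
--
--     def val(record):
--         return int(record[key]) if key in record else 0
--
--     return sorted(records, key=val, reverse=(sort_direction != "asc"))[0]
-- ===== Notes on version B (the rewrite author's own statement) =====
-- stated objective: idiomatic
-- what changed: Replaces the hand-written comparator class and explicit single-pass min/max scan with a stable sorted(records, key=val, reverse=...) followed by taking the head; stability makes the head the first extremal record exactly as A's strict comparison keeps it.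
import Mathlib
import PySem

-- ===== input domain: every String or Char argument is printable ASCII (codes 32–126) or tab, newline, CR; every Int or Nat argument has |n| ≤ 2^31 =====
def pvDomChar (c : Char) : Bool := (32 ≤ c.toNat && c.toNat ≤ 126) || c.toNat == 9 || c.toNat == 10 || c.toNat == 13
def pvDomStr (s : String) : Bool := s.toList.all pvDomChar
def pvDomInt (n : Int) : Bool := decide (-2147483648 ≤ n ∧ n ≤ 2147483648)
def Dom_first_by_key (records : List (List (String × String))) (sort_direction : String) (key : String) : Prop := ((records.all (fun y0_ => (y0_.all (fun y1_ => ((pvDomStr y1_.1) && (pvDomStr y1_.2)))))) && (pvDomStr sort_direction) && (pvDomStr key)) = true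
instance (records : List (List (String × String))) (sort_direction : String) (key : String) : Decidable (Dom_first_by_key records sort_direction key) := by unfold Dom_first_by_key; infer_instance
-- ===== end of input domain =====

-- B replaces A's comparator-class single-pass scan with a stable sort by the record's int value
-- followed by taking the head (objective: idiomatic, not faster).

-- ===== PORT A =====
-- record[key] lookup / `key in record` on the dict-as-association-list (first match)
def pvLookup : List (String × String) → String → Option String
  | [], _ => none
  | (k, v) :: rest, key => if k == key then some v else pvLookup rest key

-- `int(record[self.key]) if self.key in record else 0`; `.getD 0` is only reached outside
-- Pre_first_by_key (where Python's int() raises ValueError)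
def pvVal (key : String) (record : List (String × String)) : Int :=
  match pvLookup record key with
  | some v => (PySem.Int.ofStr? v).getD 0
  | none => 0

-- RecordComparator: lt_value = -1 if sort_direction == "asc" else 1
def pvLtValue (sort_direction : String) : Int :=
  if sort_direction == "asc" then -1 else 1

-- RecordComparator.compare
def pvCompare (key : String) (lt_value : Int) (record_1 record_2 : List (String × String)) : Int :=
  let record_1_value := pvVal key record_1
  let record_2_value := pvVal key record_2
  if record_1_value < record_2_value then lt_value
  else if record_1_value > record_2_value then -1 * lt_value
  else 0

def first_by_key (records : List (List (String × String))) (sort_direction : String) (key : String) : List (String × String) :=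
  match records with
  | [] => []
  | r0 :: rest =>
    (r0 :: rest).foldl
      (fun min_record record =>
        if pvCompare key (pvLtValue sort_direction) record min_record == -1 then record
        else min_record)
      r0

-- ===== PORT B =====
def first_by_key_alt (records : List (List (String × String))) (sort_direction : String) (key : String) : List (String × String) :=
  match records with
  | [] => []
  | _ :: _ =>
    -- ordered[0]; the sort of a nonempty list is nonempty, so headD's default is never used
    (PySem.List.sorted records (fun record => pvVal key record) (sort_direction != "asc")).headD []

-- ===== PRECONDITION & SPEC =====
-- Pre_ excludes exactly the inputs on which some record carries `key` with a value int() cannot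
-- parse: there Python A raises ValueError (and Python B raises the same way).
def Pre_first_by_key (records : List (List (String × String))) (sort_direction : String) (key : String) : Prop :=
  (records.all (fun record =>
    match pvLookup record key with
    | some v => (PySem.Int.ofStr? v).isSome
    | none => true)) = true
instance (records : List (List (String × String))) (sort_direction : String) (key : String) : Decidable (Pre_first_by_key records sort_direction key) := by unfold Pre_first_by_key; infer_instance

def pvWitness_first_by_key : (List (List (String × String))) × String × String :=
  ([[("k", "2"), ("a", "x")], [("k", "-3")], []], "asc", "k")

def Spec_first_by_key (records : List (List (String × String))) (sort_direction : String) (key : String) (out : List (String × String)) : Prop := out = first_by_key_alt records sort_direction key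
instance (records : List (List (String × String))) (sort_direction : String) (key : String) (out : List (String × String)) : Decidable (Spec_first_by_key records sort_direction key out) := by unfold Spec_first_by_key; infer_instance

-- ===== CLAIM (what is proved, stated in full; the proofs are below) =====
def Claim_equal_first_by_key : Prop := ∀ (records : List (List (String × String))) (sort_direction : String) (key : String), Dom_first_by_key records sort_direction key → Pre_first_by_key records sort_direction key → Spec_first_by_key records sort_direction key (first_by_key records sort_direction key)

-- ===== LEMMAS AND PROOFS =====

-- The head of the insertion-sort fold is exactly the strict-"before" first-extremum fold:
-- insertBy puts x at the head iff `bef x` holds of the current head.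
lemma headD_foldl_insertBy {α : Type} (bef : α → α → Bool) (t : List α) (m : α) (rest : List α) (d : α) :
    (t.foldl (fun acc r => PySem.List.insertBy bef r acc) (m :: rest)).headD d
      = t.foldl (fun m r => if bef r m then r else m) m := by
  induction t generalizing m rest with
  | nil => rfl
  | cons r t ih =>
    simp only [List.foldl_cons]
    by_cases h : bef r m
    · simp only [PySem.List.insertBy, h, if_pos]
      exact ih r (m :: rest)
    · simp only [PySem.List.insertBy, h, if_false, Bool.false_eq_true]
      exact ih m (PySem.List.insertBy bef r rest)

lemma first_by_key_eq_alt (records : List (List (String × String))) (sort_direction : String) (key : String) :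
    first_by_key records sort_direction key = first_by_key_alt records sort_direction key := by
  cases records with
  | nil => rfl
  | cons r0 rest =>
    unfold first_by_key first_by_key_alt
    simp only [List.foldl_cons]
    by_cases h : sort_direction = "asc"
    · subst h
      have hrev : (("asc" : String) != "asc") = false := by decide
      rw [hrev, PySem.List.sorted_eq_foldl_insertBy]
      simp only [List.foldl_cons]
      have h0 : PySem.List.insertBy (fun a b => decide (pvVal key a < pvVal key b)) r0 ([] : List (List (String × String))) = [r0] := rfl
      rw [h0, headD_foldl_insertBy]
      have hcmp : (fun (m r : List (String × String)) =>
            if pvCompare key (pvLtValue "asc") r m == -1 then r else m)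
          = (fun m r => if decide (pvVal key r < pvVal key m) then r else m) := by
        funext m r
        simp only [pvCompare, pvLtValue]
        rcases lt_trichotomy (pvVal key r) (pvVal key m) with hc | hc | hc
        · simp [hc]
        · simp [hc]
        · simp [hc, not_lt.mpr hc.le]
      rw [hcmp]
      simp only [ite_self]
    · have hrev : (sort_direction != "asc") = true := bne_iff_ne.mpr h
      rw [hrev, PySem.List.sorted_rev_eq_foldl_insertBy]
      simp only [List.foldl_cons]
      have h0 : PySem.List.insertBy (fun a b => decide (pvVal key b < pvVal key a)) r0 ([] : List (List (String × String))) = [r0] := rfl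
      rw [h0, headD_foldl_insertBy]
      have heq : (sort_direction == "asc") = false := beq_eq_false_iff_ne.mpr h
      have hcmp : (fun (m r : List (String × String)) =>
            if pvCompare key (pvLtValue sort_direction) r m == -1 then r else m)
          = (fun m r => if decide (pvVal key m < pvVal key r) then r else m) := by
        funext m r
        simp only [pvCompare, pvLtValue, heq]
        rcases lt_trichotomy (pvVal key r) (pvVal key m) with hc | hc | hc
        · simp [hc, not_lt.mpr hc.le]
        · simp [hc]
        · simp [hc]
          exact fun h' => absurd h' (not_lt.mpr hc.le)
      rw [hcmp]
      simp only [ite_self]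

-- ===== VERDICT (by name: the statement is the Claim_ definition above) =====
theorem first_by_key_spec : Claim_equal_first_by_key := by
  intro records sort_direction key _ _
  unfold Spec_first_by_key
  exact first_by_key_eq_alt records sort_direction key
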